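-- pv_equiv track=rewrite | github.com/hhaoz/vnpt-haha | src/data_processing/formatting.py | format_choices_display
-- ===== SOURCE A (Python) =====
-- import string
--
-- def format_choices_display(choices: list[str]) -> str:
--     """Format choices for display in console output.
--
--     Args:
--         choices: List of choice strings
--
--     Returns:
--         Formatted string with choices labeled A, B, C, D, etc.
--     """
--     option_labels = string.ascii_uppercase
--     lines = []
--     for i in range(0, len(choices), 2):
--         line_parts = []
--         for j in range(2):
--             idx = i + j
--             if idx < len(choices):
--                 label = option_labels[idx] if idx < len(option_labels) else str(idx)
--                 line_parts.append(f"{label}. {choices[idx]:<30}")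
--         if line_parts:
--             lines.append("   " + " ".join(line_parts))
--     return "\n".join(lines)
-- ===== SOURCE B (Python) =====
-- def format_choices_display(choices: list[str]) -> str:
--     """Consume the choices through an iterator two at a time, building each row directly."""
--     def fmt(idx, c):
--         label = chr(65 + idx) if idx < 26 else str(idx)
--         return f"{label}. {c:<30}"
--
--     it = iter(choices)
--     rows = []
--     idx = 0
--     for first in it:
--         second = next(it, None)
--         if second is None:
--             rows.append("   " + fmt(idx, first))
--         else:
--             rows.append("   " + fmt(idx, first) + " " + fmt(idx + 1, second))
--         idx += 2
--     return "\n".join(rows)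
-- ===== Notes on version B (the rewrite author's own statement) =====
-- stated objective: alternative
-- what changed: Replaces A's index-driven nested loops (range over even indices, inner j-loop with bounds checks, conditional appends and a join of collected parts) by a streaming pass that pulls elements off an iterator two at a time, concatenating each row directly and computing labels by chr(65+idx).
import Mathlib
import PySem

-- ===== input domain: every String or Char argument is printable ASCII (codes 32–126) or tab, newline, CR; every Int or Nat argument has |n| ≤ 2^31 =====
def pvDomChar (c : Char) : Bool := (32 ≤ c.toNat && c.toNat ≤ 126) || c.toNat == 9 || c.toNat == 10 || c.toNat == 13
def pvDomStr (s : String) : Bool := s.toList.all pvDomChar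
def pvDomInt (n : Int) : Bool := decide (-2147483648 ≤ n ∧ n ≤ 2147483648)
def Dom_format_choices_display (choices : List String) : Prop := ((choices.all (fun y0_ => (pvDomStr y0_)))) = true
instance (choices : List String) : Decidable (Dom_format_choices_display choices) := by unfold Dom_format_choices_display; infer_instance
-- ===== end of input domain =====

-- B replaces A's index-driven nested loops by a structural recursion consuming the list two at a time (objective: alternative).

-- ===== PORT A =====
-- string handling is done on List Char (PySem.Chars); f"{s:<30}" is cs ++ replicate (30 - len) ' ' (exact: Python pads by len(s))
def format_choices_display (choices : List String) : String :=
  let n : Int := (choices.length : Int)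
  let lines : List (List Char) :=
    (PySem.List.pyRange 0 n 2).foldl (fun lines i =>
      let line_parts : List (List Char) :=
        (PySem.List.pyRange 0 2 1).foldl (fun lp j =>
          let idx := i + j
          if idx < n then
            let label : List Char :=
              if idx < 26 then
                match PySem.List.pyGet? "ABCDEFGHIJKLMNOPQRSTUVWXYZ".toList idx with
                | some c => [c]
                | none => []
              else PySem.Int.toChars idx
            let cs := (PySem.List.pyGetD choices idx "").toList
            lp ++ [label ++ ('.' :: ' ' :: (cs ++ List.replicate (30 - cs.length) ' '))]
          else lp) []
      if line_parts.isEmpty then lines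
      else lines ++ [' ' :: ' ' :: ' ' :: PySem.Chars.join [' '] line_parts]) []
  String.ofList (PySem.Chars.join ['\n'] lines)

-- ===== PORT B =====
-- fmt(idx, c): chr(65+idx) is Char.ofNat (65 + idx.toNat) (exact for 0 ≤ idx < 26, the only branch using it)
def pvFmtB (idx : Int) (c : String) : List Char :=
  let label : List Char := if idx < 26 then [Char.ofNat (65 + idx.toNat)] else PySem.Int.toChars idx
  let cs := c.toList
  label ++ ('.' :: ' ' :: (cs ++ List.replicate (30 - cs.length) ' '))

-- the iterator loop pulling two choices per step: structural recursion two elements at a time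
def pvGoB (idx : Int) : List String → List (List Char)
  | [] => []
  | [c] => [' ' :: ' ' :: ' ' :: pvFmtB idx c]
  | c1 :: c2 :: rest =>
      (' ' :: ' ' :: ' ' :: (pvFmtB idx c1 ++ ' ' :: pvFmtB (idx + 1) c2)) :: pvGoB (idx + 2) rest

def format_choices_display_alt (choices : List String) : String :=
  String.ofList (PySem.Chars.join ['\n'] (pvGoB 0 choices))

-- ===== PRECONDITION & SPEC =====
def Spec_format_choices_display (choices : List String) (out : String) : Prop := out = format_choices_display_alt choices
instance (choices : List String) (out : String) : Decidable (Spec_format_choices_display choices out) := by unfold Spec_format_choices_display; infer_instance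

-- ===== CLAIM (what is proved, stated in full; the proofs are below) =====
def Claim_equal_format_choices_display : Prop := ∀ (choices : List String), Dom_format_choices_display choices → Spec_format_choices_display choices (format_choices_display choices)

-- ===== LEMMAS AND PROOFS =====

-- the token A builds at index k (proof-side helper)
def pvTok (choices : List String) (k : Nat) : List Char :=
  let label : List Char :=
    if (k : Int) < 26 then
      match PySem.List.pyGet? "ABCDEFGHIJKLMNOPQRSTUVWXYZ".toList (k : Int) with
      | some c => [c]
      | none => []
    else PySem.Int.toChars (k : Int)
  let cs := (choices.getD k "").toList
  label ++ ('.' :: ' ' :: (cs ++ List.replicate (30 - cs.length) ' '))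

lemma fmt_eq_tok (choices : List String) (k : Nat) (hk : k < choices.length) :
    pvFmtB (k : Int) (choices.getD k "") = pvTok choices k := by
  unfold pvFmtB pvTok
  by_cases h : (k : Int) < 26
  · rw [if_pos h, if_pos h]
    have hk26 : k < 26 := by omega
    have : (match PySem.List.pyGet? "ABCDEFGHIJKLMNOPQRSTUVWXYZ".toList (k : Int) with
        | some c => [c] | none => []) = [Char.ofNat (65 + k)] := by
      interval_cases k <;> decide
    rw [this, Int.toNat_natCast]
  · rw [if_neg h, if_neg h]

lemma inner_parts (choices : List String) (i : Int) (h0 : 0 ≤ i) (hn : i < (choices.length : Int)) :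
    (PySem.List.pyRange 0 2 1).foldl (fun lp j =>
      let idx := i + j
      if idx < (choices.length : Int) then
        let label : List Char :=
          if idx < 26 then
            match PySem.List.pyGet? "ABCDEFGHIJKLMNOPQRSTUVWXYZ".toList idx with
            | some c => [c]
            | none => []
          else PySem.Int.toChars idx
        let cs := (PySem.List.pyGetD choices idx "").toList
        lp ++ [label ++ ('.' :: ' ' :: (cs ++ List.replicate (30 - cs.length) ' '))]
      else lp) []
    = [pvTok choices i.toNat] ++ (if i.toNat + 1 < choices.length then [pvTok choices (i.toNat + 1)] else []) := by
  have hrange : PySem.List.pyRange 0 2 1 = [0, 1] := by decide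
  rw [hrange]
  have hget : ∀ (m : Nat), m < choices.length → PySem.List.pyGetD choices (m : Int) "" = choices.getD m "" := by
    intro m hm
    simp [PySem.List.pyGetD_natCast]
  have htok : ∀ (m : Nat), m < choices.length →
      (if (m : Int) < 26 then
          match PySem.List.pyGet? "ABCDEFGHIJKLMNOPQRSTUVWXYZ".toList (m : Int) with
          | some c => [c]
          | none => []
        else PySem.Int.toChars (m : Int)) ++
        ('.' :: ' ' :: ((PySem.List.pyGetD choices (m : Int) "").toList ++
          List.replicate (30 - (PySem.List.pyGetD choices (m : Int) "").toList.length) ' '))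
      = pvTok choices m := by
    intro m hm
    rw [pvTok, hget m hm]
  simp only [List.foldl_cons, List.foldl_nil]
  have c0 : i + 0 = ((i.toNat : Nat) : Int) := by omega
  have c1 : i + 1 = (((i.toNat + 1 : Nat)) : Int) := by omega
  by_cases h1 : i + 1 < (choices.length : Int)
  · have hA : i + 0 < (choices.length : Int) := by omega
    have h1n : i.toNat + 1 < choices.length := by omega
    rw [if_pos hA, if_pos h1, if_pos h1n, c0, c1,
        htok i.toNat (by omega), htok (i.toNat + 1) h1n]
    simp
  · have hA : i + 0 < (choices.length : Int) := by omega
    have h1n : ¬ (i.toNat + 1 < choices.length) := by omega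
    rw [if_pos hA, if_neg h1, if_neg h1n, c0, htok i.toNat (by omega)]
    simp

lemma pyRange_two_nil (a b : Int) (h : b ≤ a) : PySem.List.pyRange a b 2 = [] := by
  rw [PySem.List.pyRange_of_pos a b (by omega : (0:Int) < 2), if_neg (by omega)]
  simp

lemma pyRange_two_cons (a b : Int) (h : a < b) :
    PySem.List.pyRange a b 2 = a :: PySem.List.pyRange (a + 2) b 2 := by
  rw [PySem.List.pyRange_of_pos a b (by omega : (0:Int) < 2),
      PySem.List.pyRange_of_pos (a + 2) b (by omega : (0:Int) < 2)]
  by_cases h2 : a + 2 < b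
  · rw [if_pos h, if_pos h2]
    have : ((b - a + 2 - 1) / 2).toNat = ((b - (a + 2) + 2 - 1) / 2).toNat + 1 := by omega
    rw [this, List.range_succ_eq_map]
    simp only [List.map_cons, List.map_map, Nat.cast_zero, mul_zero, add_zero]
    congr 1
    apply List.map_congr_left
    intro k _
    simp only [Function.comp, Nat.succ_eq_add_one]
    push_cast
    ring
  · rw [if_pos h, if_neg h2]
    have : ((b - a + 2 - 1) / 2).toNat = 1 := by omega
    rw [this]
    simp

-- A's line list (as a map over the even indices) equals B's recursion, generalized over the suffix
lemma go_eq (choices : List String) : ∀ (rest : List String) (m : Nat),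
    rest = choices.drop m →
    (PySem.List.pyRange (m : Int) (choices.length : Int) 2).map (fun i =>
      ' ' :: ' ' :: ' ' :: PySem.Chars.join [' ']
        ([pvTok choices i.toNat] ++ (if i.toNat + 1 < choices.length then [pvTok choices (i.toNat + 1)] else [])))
    = pvGoB (m : Int) rest := by
  suffices H : ∀ (n : Nat) (rest : List String), rest.length ≤ n → ∀ (m : Nat),
      rest = choices.drop m →
      (PySem.List.pyRange (m : Int) (choices.length : Int) 2).map (fun i =>
        ' ' :: ' ' :: ' ' :: PySem.Chars.join [' ']
          ([pvTok choices i.toNat] ++ (if i.toNat + 1 < choices.length then [pvTok choices (i.toNat + 1)] else [])))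
      = pvGoB (m : Int) rest by
    intro rest m hm
    exact H rest.length rest le_rfl m hm
  intro n
  induction n with
  | zero =>
    intro rest hlen m hm
    have hre : rest = [] := by cases rest with | nil => rfl | cons a l => simp at hlen
    subst hre
    have : choices.length ≤ m := by
      have := congrArg List.length hm
      simp [List.length_drop] at this
      omega
    rw [pyRange_two_nil _ _ (by omega), pvGoB]
    simp
  | succ n ih =>
    intro rest hlen m hm
    rcases rest with _ | ⟨c, rest⟩
    · have : choices.length ≤ m := by
        have := congrArg List.length hm
        simp [List.length_drop] at this
        omega
      rw [pyRange_two_nil _ _ (by omega), pvGoB]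
      simp
    rcases rest with _ | ⟨c2, rest⟩
    · have hlen1 : choices.length = m + 1 := by
        have := congrArg List.length hm
        simp [List.length_drop] at this
        omega
      have hmlt : m < choices.length := by omega
      have hc : choices.getD m "" = c := by
        have : (choices.drop m).getD 0 "" = c := by rw [← hm]; rfl
        simpa [List.getD_eq_getElem?_getD, List.getElem?_drop] using this
      rw [pyRange_two_cons _ _ (by exact_mod_cast hmlt), pyRange_two_nil _ _ (by omega), pvGoB]
      simp only [List.map_cons, List.map_nil, Int.toNat_natCast]
      rw [if_neg (by omega), ← hc, fmt_eq_tok choices m hmlt]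
      simp only [List.append_nil]
      rw [PySem.Chars.join_singleton]
    · have hlen2 : m + 2 ≤ choices.length := by
        have := congrArg List.length hm
        simp [List.length_drop] at this
        omega
      have hc1 : choices.getD m "" = c := by
        have : (choices.drop m).getD 0 "" = c := by rw [← hm]; rfl
        simpa [List.getD_eq_getElem?_getD, List.getElem?_drop] using this
      have hc2 : choices.getD (m + 1) "" = c2 := by
        have : (choices.drop m).getD 1 "" = c2 := by rw [← hm]; rfl
        simpa [List.getD_eq_getElem?_getD, List.getElem?_drop] using this
      have hdrop : rest = choices.drop (m + 2) := by
        have : (choices.drop m).drop 2 = rest := by rw [← hm]; rfl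
        rw [← this, List.drop_drop]
      have hrlen : rest.length ≤ n := by
        simp at hlen
        omega
      rw [pyRange_two_cons _ _ (by exact_mod_cast (by omega : m < choices.length)), List.map_cons]
      have hcast : ((m : Int) + 2) = ((m + 2 : Nat) : Int) := by omega
      rw [hcast, ih rest hrlen (m + 2) hdrop, pvGoB]
      simp only [Int.toNat_natCast]
      rw [if_pos (by omega), ← hc1, ← hc2, fmt_eq_tok choices m (by omega)]
      have : ((m : Int) + 1) = ((m + 1 : Nat) : Int) := by omega
      rw [this, fmt_eq_tok choices (m + 1) (by omega)]
      simp only [List.singleton_append]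
      rw [PySem.Chars.join_cons_cons, PySem.Chars.join_singleton]
      simp only [List.append_assoc, List.singleton_append, hcast]

-- ===== VERDICT (by name: the statement is the Claim_ definition above) =====
theorem format_choices_display_spec : Claim_equal_format_choices_display := by
  intro choices _
  unfold Spec_format_choices_display format_choices_display format_choices_display_alt
  simp only []
  congr 1
  have hmem : ∀ i ∈ PySem.List.pyRange 0 (choices.length : Int) 2, 0 ≤ i ∧ i < (choices.length : Int) := by
    intro i hi
    have := (PySem.List.mem_pyRange_iff_of_pos (by omega) i).1 hi
    omega
  rw [PySem.List.foldl_congr_mem _ _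
      (fun lines i => lines ++ [' ' :: ' ' :: ' ' :: PySem.Chars.join [' ']
        ([pvTok choices i.toNat] ++ (if i.toNat + 1 < choices.length then [pvTok choices (i.toNat + 1)] else []))]) []
      (by
        intro acc i hi
        obtain ⟨h0, hnn⟩ := hmem i hi
        simp only
        rw [inner_parts choices i h0 hnn]
        have : ([pvTok choices i.toNat] ++ (if i.toNat + 1 < choices.length then [pvTok choices (i.toNat + 1)] else [])).isEmpty = false := by
          simp
        rw [this]
        simp),
    PySem.List.foldl_append_singleton_eq_map]
  rw [List.nil_append]
  have h0 : ((0 : Nat) : Int) = (0 : Int) := rfl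
  rw [← h0, go_eq choices choices 0 (by simp), h0]
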